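-- pv_equiv track=rewrite | github.com/gyur2/algo_study | 조서림/week 3/BOJ 12933.py | quack
-- ===== SOURCE A (Python) =====
-- def quack(s):
--     duck = []
--     sound = "quack"
--
--     for c in s:
--         if c == "q": # q일 때
--             flag = True
--             for i in range(len(duck)):
--                 if len(duck[i]) % 5 == 0: # 울음소리가 완성된 오리가 있다면 새 울음 시작
--                     duck[i] += c
--                     flag = False
--                     break
--             if flag: # 울음소리가 완성된 오리가 없다면 새 오리 시작
--                 duck.append("q")
--
--         else: # q가 아닐 때
--             flag = True
--             for i in range(len(duck)):
--                 if len(duck[i]) % 5 == sound.find(c): # 울음소리 순서에 맞는 오리가 있다면 해당 오리에 문자 추가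
--                     duck[i] += c
--                     flag = False
--                     break
--             if flag:
--                 return -1 # 울음소리 순서에 맞는 오리가 없다면 잘못된 울음소리
--
--     for d in duck:
--         if len(d) % 5 != 0: # 울음소리를 완성하지 못한 오리가 있다면 잘못된 울음소리
--             return -1
--     return len(duck) # 오리의 수 return
-- ===== SOURCE B (Python) =====
-- def quack(s):
--     # One pass: count ducks waiting for each next letter; O(n) instead of A's O(n*ducks).
--     done = need_u = need_a = need_c = need_k = 0
--     total = 0
--     for ch in s:
--         if ch == 'q':
--             if done:
--                 done -= 1
--             else:
--                 total += 1
--             need_u += 1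
--         elif ch == 'u':
--             if not need_u:
--                 return -1
--             need_u -= 1
--             need_a += 1
--         elif ch == 'a':
--             if not need_a:
--                 return -1
--             need_a -= 1
--             need_c += 1
--         elif ch == 'c':
--             if not need_c:
--                 return -1
--             need_c -= 1
--             need_k += 1
--         elif ch == 'k':
--             if not need_k:
--                 return -1
--             need_k -= 1
--             done += 1
--         else:
--             return -1
--     if need_u or need_a or need_c or need_k:
--         return -1
--     return total
-- ===== Notes on version B (the rewrite author's own statement) =====
-- stated objective: faster
-- what changed: Replaces the list of per-duck strings with an inner scan per character by five integer counters of ducks waiting for each next letter, updated in O(1) per character.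
import Mathlib
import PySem

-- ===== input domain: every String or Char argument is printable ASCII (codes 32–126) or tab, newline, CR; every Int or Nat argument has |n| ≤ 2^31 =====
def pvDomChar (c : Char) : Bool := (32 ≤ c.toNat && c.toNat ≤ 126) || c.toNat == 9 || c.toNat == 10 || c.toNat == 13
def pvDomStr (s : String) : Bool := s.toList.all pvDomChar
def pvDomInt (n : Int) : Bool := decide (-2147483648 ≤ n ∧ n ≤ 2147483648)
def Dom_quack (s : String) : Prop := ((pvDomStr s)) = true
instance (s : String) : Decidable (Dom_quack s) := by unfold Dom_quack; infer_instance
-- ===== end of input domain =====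

-- B changes the algorithm: five integer counters instead of a per-duck string list with an inner scan.

-- ===== PORT A =====

-- sound.find(c) for a single character c: index of first occurrence in "quack", -1 if absent
-- (exact for single-character needles, which is the only way A uses str.find).
def soundFind (cs : List Char) (c : Char) (i : Int) : Int :=
  match cs with
  | [] => -1
  | x :: xs => if x = c then i else soundFind xs c (i + 1)

-- the inner 'for i in range(len(duck))' loop: append c to the first duck whose len % 5 == t;
-- none means no duck matched (flag stayed True).
def tryAppend (t : Int) (c : Char) : List (List Char) → Option (List (List Char))
  | [] => none
  | d :: ds =>
    if ((d.length : Int) % 5 = t) then some ((d ++ [c]) :: ds)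
    else (tryAppend t c ds).map (fun r => d :: r)

def quackLoop : List Char → List (List Char) → Option (List (List Char))
  | [], duck => some duck
  | c :: rest, duck =>
    if c = 'q' then
      match tryAppend 0 c duck with
      | some d' => quackLoop rest d'
      | none => quackLoop rest (duck ++ [['q']])
    else
      match tryAppend (soundFind "quack".toList c 0) c duck with
      | some d' => quackLoop rest d'
      | none => none

def quack (s : String) : Int :=
  match quackLoop s.toList [] with
  | none => -1
  | some duck => if duck.any (fun d => decide ((d.length : Int) % 5 ≠ 0)) then -1 else duck.length

-- ===== PORT B =====

def altLoop : List Char → Int → Int → Int → Int → Int → Int → Int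
  | [], _, nu, na, nc, nk, tot =>
    if nu ≠ 0 ∨ na ≠ 0 ∨ nc ≠ 0 ∨ nk ≠ 0 then -1 else tot
  | ch :: rest, done, nu, na, nc, nk, tot =>
    if ch = 'q' then
      if done ≠ 0 then altLoop rest (done - 1) (nu + 1) na nc nk tot
      else altLoop rest done (nu + 1) na nc nk (tot + 1)
    else if ch = 'u' then
      if nu = 0 then -1 else altLoop rest done (nu - 1) (na + 1) nc nk tot
    else if ch = 'a' then
      if na = 0 then -1 else altLoop rest done nu (na - 1) (nc + 1) nk tot
    else if ch = 'c' then
      if nc = 0 then -1 else altLoop rest done nu na (nc - 1) (nk + 1) tot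
    else if ch = 'k' then
      if nk = 0 then -1 else altLoop rest (done + 1) nu na nc (nk - 1) tot
    else -1

def quack_alt (s : String) : Int := altLoop s.toList 0 0 0 0 0 0

-- ===== PRECONDITION & SPEC =====
def Spec_quack (s : String) (out : Int) : Prop := out = quack_alt s
instance (s : String) (out : Int) : Decidable (Spec_quack s out) := by unfold Spec_quack; infer_instance

-- ===== CLAIM (what is proved, stated in full; the proofs are below) =====
def Claim_equal_quack : Prop := ∀ (s : String), Dom_quack s → Spec_quack s (quack s)

-- ===== LEMMAS AND PROOFS =====

-- number of ducks whose length mod 5 is j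
def cnt (j : Int) (L : List (List Char)) : Int :=
  (L.countP (fun d => decide ((d.length : Int) % 5 = j)) : Int)

lemma cnt_nonneg (j : Int) (L : List (List Char)) : 0 ≤ cnt j L := Int.natCast_nonneg _

lemma cnt_nil (j : Int) : cnt j [] = 0 := rfl

lemma cnt_append_single (j : Int) (L : List (List Char)) (d : List Char) :
    cnt j (L ++ [d]) = cnt j L + (if (d.length : Int) % 5 = j then 1 else 0) := by
  simp only [cnt, List.countP_append, List.countP_cons, List.countP_nil, decide_eq_true_eq]
  push_cast
  split_ifs <;> omega

lemma tryAppend_eq_none_iff (t : Int) (c : Char) (L : List (List Char)) :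
    tryAppend t c L = none ↔ cnt t L = 0 := by
  induction L with
  | nil => simp [tryAppend, cnt_nil]
  | cons d ds ih =>
    by_cases hd : (d.length : Int) % 5 = t
    · simp [tryAppend, hd, cnt]
      omega
    · simp only [tryAppend, if_neg hd, Option.map_eq_none_iff, ih,
        cnt, List.countP_cons, decide_eq_true_eq]
      push_cast
      omega

lemma cnt_neg_one (L : List (List Char)) : cnt (-1) L = 0 := by
  simp [cnt, List.countP_eq_zero]
  intro d _
  have := Int.emod_nonneg (d.length : Int) (by norm_num : (5:Int) ≠ 0)
  omega

lemma tryAppend_some_spec (t : Int) (c : Char) (L L' : List (List Char))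
    (h : tryAppend t c L = some L') :
    L'.length = L.length ∧
      ∀ j : Int, cnt j L' + (if t = j then 1 else 0)
        = cnt j L + (if (t + 1) % 5 = j then 1 else 0) := by
  induction L generalizing L' with
  | nil => simp [tryAppend] at h
  | cons d ds ih =>
    by_cases hd : (d.length : Int) % 5 = t
    · simp only [tryAppend, if_pos hd, Option.some.injEq] at h
      subst h
      constructor
      · simp
      · intro j
        have hm : ((d ++ [c]).length : Int) % 5 = (t + 1) % 5 := by
          simp [List.length_append]
          omega
        simp only [cnt, List.countP_cons, decide_eq_true_eq, hm]
        push_cast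
        split_ifs <;> omega
    · simp only [tryAppend, if_neg hd, Option.map_eq_some_iff] at h
      obtain ⟨r, hr, hL'⟩ := h
      obtain ⟨hlen, hcnt⟩ := ih r hr
      subst hL'
      constructor
      · simp [hlen]
      · intro j
        have := hcnt j
        simp only [cnt, List.countP_cons, decide_eq_true_eq] at *
        push_cast at *
        split_ifs <;> omega

lemma any_eq_counts (L : List (List Char)) :
    (L.any (fun d => decide ((d.length : Int) % 5 ≠ 0)) = true) ↔
      (cnt 1 L ≠ 0 ∨ cnt 2 L ≠ 0 ∨ cnt 3 L ≠ 0 ∨ cnt 4 L ≠ 0) := by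
  induction L with
  | nil => simp [cnt_nil]
  | cons d ds ih =>
    have h0 : 0 ≤ (d.length : Int) % 5 := Int.emod_nonneg _ (by norm_num)
    have h5 : (d.length : Int) % 5 < 5 := Int.emod_lt_of_pos _ (by norm_num)
    have n1 := cnt_nonneg 1 ds
    have n2 := cnt_nonneg 2 ds
    have n3 := cnt_nonneg 3 ds
    have n4 := cnt_nonneg 4 ds
    simp only [List.any_cons, Bool.or_eq_true, decide_eq_true_eq, ih]
    simp only [cnt, List.countP_cons, decide_eq_true_eq] at *
    push_cast at *
    split_ifs with a1 a2 a3 a4 <;> constructor <;> intro h <;> omega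

def finishA : Option (List (List Char)) → Int
  | none => -1
  | some duck =>
    if duck.any (fun d => decide ((d.length : Int) % 5 ≠ 0)) then -1 else duck.length

lemma loop_eq (chars : List Char) : ∀ (L : List (List Char)),
    finishA (quackLoop chars L)
      = altLoop chars (cnt 0 L) (cnt 1 L) (cnt 2 L) (cnt 3 L) (cnt 4 L) (L.length : Int) := by
  induction chars with
  | nil =>
    intro L
    simp only [quackLoop, altLoop, finishA]
    by_cases h : cnt 1 L ≠ 0 ∨ cnt 2 L ≠ 0 ∨ cnt 3 L ≠ 0 ∨ cnt 4 L ≠ 0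
    · rw [if_pos ((any_eq_counts L).2 h), if_pos h]
    · rw [if_neg (fun hh => h ((any_eq_counts L).1 hh)), if_neg h]
  | cons c rest ih =>
    intro L
    by_cases hq : c = 'q'
    · subst hq
      rw [quackLoop, altLoop, if_pos rfl, if_pos rfl]
      cases h : tryAppend 0 'q' L with
      | none =>
        have hc0 : cnt 0 L = 0 := (tryAppend_eq_none_iff 0 'q' L).1 h
        rw [if_neg (by omega : ¬ cnt 0 L ≠ 0), ih (L ++ [['q']])]
        have e0 := cnt_append_single 0 L ['q']
        have e1 := cnt_append_single 1 L ['q']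
        have e2 := cnt_append_single 2 L ['q']
        have e3 := cnt_append_single 3 L ['q']
        have e4 := cnt_append_single 4 L ['q']
        norm_num at e0 e1 e2 e3 e4
        rw [e0, e1, e2, e3, e4]
        congr 1
        simp [List.length_append]
      | some L' =>
        have hc0 : cnt 0 L ≠ 0 := fun hz => by
          rw [(tryAppend_eq_none_iff 0 'q' L).2 hz] at h; simp at h
        obtain ⟨hlen, hcnt⟩ := tryAppend_some_spec 0 'q' L L' h
        rw [if_pos hc0, ih L', hlen]
        have e0 := hcnt 0; have e1 := hcnt 1; have e2 := hcnt 2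
        have e3 := hcnt 3; have e4 := hcnt 4
        norm_num at e0 e1 e2 e3 e4
        rw [show cnt 0 L' = cnt 0 L - 1 from by omega, show cnt 1 L' = cnt 1 L + 1 from by omega,
            show cnt 2 L' = cnt 2 L from by omega, show cnt 3 L' = cnt 3 L from by omega,
            show cnt 4 L' = cnt 4 L from by omega]
    · rw [quackLoop, altLoop, if_neg hq, if_neg hq]
      have hql : "quack".toList = ['q', 'u', 'a', 'c', 'k'] := by decide
      by_cases hu : c = 'u'
      · subst hu
        rw [if_pos rfl]
        have hf : soundFind "quack".toList 'u' 0 = 1 := by rw [hql]; decide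
        rw [hf]
        cases h : tryAppend 1 'u' L with
        | none =>
          rw [(tryAppend_eq_none_iff 1 'u' L).1 h]
          simp [finishA]
        | some L' =>
          have hc1 : cnt 1 L ≠ 0 := fun hz => by
            rw [(tryAppend_eq_none_iff 1 'u' L).2 hz] at h; simp at h
          obtain ⟨hlen, hcnt⟩ := tryAppend_some_spec 1 'u' L L' h
          rw [if_neg hc1, ih L', hlen]
          have e0 := hcnt 0; have e1 := hcnt 1; have e2 := hcnt 2
          have e3 := hcnt 3; have e4 := hcnt 4
          norm_num at e0 e1 e2 e3 e4
          rw [show cnt 0 L' = cnt 0 L from by omega, show cnt 1 L' = cnt 1 L - 1 from by omega,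
            show cnt 2 L' = cnt 2 L + 1 from by omega, show cnt 3 L' = cnt 3 L from by omega,
            show cnt 4 L' = cnt 4 L from by omega]
      · rw [if_neg hu]
        by_cases ha : c = 'a'
        · subst ha
          rw [if_pos rfl]
          have hf : soundFind "quack".toList 'a' 0 = 2 := by rw [hql]; decide
          rw [hf]
          cases h : tryAppend 2 'a' L with
          | none =>
            rw [(tryAppend_eq_none_iff 2 'a' L).1 h]
            simp [finishA]
          | some L' =>
            have hc2 : cnt 2 L ≠ 0 := fun hz => by
              rw [(tryAppend_eq_none_iff 2 'a' L).2 hz] at h; simp at h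
            obtain ⟨hlen, hcnt⟩ := tryAppend_some_spec 2 'a' L L' h
            rw [if_neg hc2, ih L', hlen]
            have e0 := hcnt 0; have e1 := hcnt 1; have e2 := hcnt 2
            have e3 := hcnt 3; have e4 := hcnt 4
            norm_num at e0 e1 e2 e3 e4
            rw [show cnt 0 L' = cnt 0 L from by omega, show cnt 1 L' = cnt 1 L from by omega,
            show cnt 2 L' = cnt 2 L - 1 from by omega, show cnt 3 L' = cnt 3 L + 1 from by omega,
            show cnt 4 L' = cnt 4 L from by omega]
        · rw [if_neg ha]
          by_cases hc : c = 'c'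
          · subst hc
            rw [if_pos rfl]
            have hf : soundFind "quack".toList 'c' 0 = 3 := by rw [hql]; decide
            rw [hf]
            cases h : tryAppend 3 'c' L with
            | none =>
              rw [(tryAppend_eq_none_iff 3 'c' L).1 h]
              simp [finishA]
            | some L' =>
              have hc3 : cnt 3 L ≠ 0 := fun hz => by
                rw [(tryAppend_eq_none_iff 3 'c' L).2 hz] at h; simp at h
              obtain ⟨hlen, hcnt⟩ := tryAppend_some_spec 3 'c' L L' h
              rw [if_neg hc3, ih L', hlen]
              have e0 := hcnt 0; have e1 := hcnt 1; have e2 := hcnt 2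
              have e3 := hcnt 3; have e4 := hcnt 4
              norm_num at e0 e1 e2 e3 e4
              rw [show cnt 0 L' = cnt 0 L from by omega, show cnt 1 L' = cnt 1 L from by omega,
            show cnt 2 L' = cnt 2 L from by omega, show cnt 3 L' = cnt 3 L - 1 from by omega,
            show cnt 4 L' = cnt 4 L + 1 from by omega]
          · rw [if_neg hc]
            by_cases hk : c = 'k'
            · subst hk
              rw [if_pos rfl]
              have hf : soundFind "quack".toList 'k' 0 = 4 := by rw [hql]; decide
              rw [hf]
              cases h : tryAppend 4 'k' L with
              | none =>
                rw [(tryAppend_eq_none_iff 4 'k' L).1 h]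
                simp [finishA]
              | some L' =>
                have hc4 : cnt 4 L ≠ 0 := fun hz => by
                  rw [(tryAppend_eq_none_iff 4 'k' L).2 hz] at h; simp at h
                obtain ⟨hlen, hcnt⟩ := tryAppend_some_spec 4 'k' L L' h
                rw [if_neg hc4, ih L', hlen]
                have e0 := hcnt 0; have e1 := hcnt 1; have e2 := hcnt 2
                have e3 := hcnt 3; have e4 := hcnt 4
                norm_num at e0 e1 e2 e3 e4
                rw [show cnt 0 L' = cnt 0 L + 1 from by omega, show cnt 1 L' = cnt 1 L from by omega,
            show cnt 2 L' = cnt 2 L from by omega, show cnt 3 L' = cnt 3 L from by omega,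
            show cnt 4 L' = cnt 4 L - 1 from by omega]
            · rw [if_neg hk]
              have hf : soundFind "quack".toList c 0 = -1 := by
                rw [hql]; simp [soundFind, eq_comm, hq, hu, ha, hc, hk]
              rw [hf, (tryAppend_eq_none_iff (-1) c L).2 (cnt_neg_one L)]
              rfl

-- ===== VERDICT (by name: the statement is the Claim_ definition above) =====
theorem quack_spec : Claim_equal_quack := by
  intro s _
  unfold Spec_quack quack quack_alt
  have h := loop_eq s.toList []
  simp only [cnt_nil, List.length_nil, Nat.cast_zero] at h
  rw [← h]
  cases quackLoop s.toList [] <;> rfl
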